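-- pv_equiv track=rewrite | github.com/fcheltso/toric-graph-computations | src/graph_counter.py | is_induced_subgraph
-- ===== SOURCE A (Python) =====
-- import itertools
-- from typing import Callable, Dict, Iterable, List, Optional, Sequence, Tuple
--
-- Vertex = int
--
-- Edge = Tuple[Vertex, Vertex]
--
-- def _sorted_edge(u: int, v: int) -> Edge:
--     return (u, v) if u <= v else (v, u)
--
-- def is_induced_subgraph(
--     small_edges: Sequence[Edge],
--     large_edges: Sequence[Edge],
--     n_large: int,
-- ) -> Tuple[bool, Optional[Dict[Vertex, Vertex]]]:
--     """
--     Check whether the graph with edge set small_edges appears as an induced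
--     subgraph of the graph with edge set large_edges on {0, ..., n_large - 1}.
--     """
--     # Recover the vertex set of the smaller graph from its edges.
--     small_vertices_set = set()
--     for u, v in small_edges:
--         small_vertices_set.add(u)
--         small_vertices_set.add(v)
--     small_vertices = sorted(small_vertices_set)
--     k = len(small_vertices)
--
--     if k > n_large:
--         return False, None
--
--     large_edge_set = set(_sorted_edge(u, v) for (u, v) in large_edges)
--     small_edge_set = set(_sorted_edge(u, v) for (u, v) in small_edges)
--
--     # Check all injective maps from the smaller graph into the larger one.
--     for image in itertools.permutations(range(n_large), k):
--         mapping = dict(zip(small_vertices, image))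
--
--         ok = True
--         for i in range(k):
--             for j in range(i + 1, k):
--                 u_s, v_s = small_vertices[i], small_vertices[j]
--                 u_l, v_l = mapping[u_s], mapping[v_s]
--
--                 in_small = _sorted_edge(u_s, v_s) in small_edge_set
--                 in_large = _sorted_edge(u_l, v_l) in large_edge_set
--
--                 if in_small != in_large:
--                     ok = False
--                     break
--             if not ok:
--                 break
--
--         if ok:
--             return True, mapping
--
--     return False, None
-- ===== SOURCE B (Python) =====
-- def is_induced_subgraph(small_edges, large_edges, n_large):
--     verts = sorted({v for e in small_edges for v in e})
--     k = len(verts)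
--     if k > n_large:
--         return False, None
--     small_set = {(u, v) if u <= v else (v, u) for (u, v) in small_edges}
--     large_set = {(u, v) if u <= v else (v, u) for (u, v) in large_edges}
--
--     def compatible(assigned, u, c):
--         # the fresh pair (u -> c) must agree with every already placed vertex
--         for (w, d) in assigned:
--             e_s = (w, u) if w <= u else (u, w)
--             e_l = (d, c) if d <= c else (c, d)
--             if (e_s in small_set) != (e_l in large_set):
--                 return False
--         return True
--
--     def search(assigned, rest):
--         # assigned: partial embedding (lex-minimal first); rest: vertices still to place
--         if not rest:
--             return dict(assigned)
--         u = rest[0]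
--         used = {d for (_, d) in assigned}
--         for c in range(n_large):
--             if c in used:
--                 continue
--             if compatible(assigned, u, c):
--                 r = search(assigned + [(u, c)], rest[1:])
--                 if r is not None:
--                     return r
--         return None
--
--     m = search([], verts)
--     return (True, m) if m is not None else (False, None)
-- ===== Notes on version B (the rewrite author's own statement) =====
-- stated objective: alternative
-- what changed: A tests every k-permutation of range(n_large) against the full pairwise induced-subgraph check; B does incremental backtracking that places small vertices one at a time in the same lexicographic candidate order and prunes a candidate as soon as it is inconsistent with the already-placed prefix, returning the identical first embedding.
import Mathlib
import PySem

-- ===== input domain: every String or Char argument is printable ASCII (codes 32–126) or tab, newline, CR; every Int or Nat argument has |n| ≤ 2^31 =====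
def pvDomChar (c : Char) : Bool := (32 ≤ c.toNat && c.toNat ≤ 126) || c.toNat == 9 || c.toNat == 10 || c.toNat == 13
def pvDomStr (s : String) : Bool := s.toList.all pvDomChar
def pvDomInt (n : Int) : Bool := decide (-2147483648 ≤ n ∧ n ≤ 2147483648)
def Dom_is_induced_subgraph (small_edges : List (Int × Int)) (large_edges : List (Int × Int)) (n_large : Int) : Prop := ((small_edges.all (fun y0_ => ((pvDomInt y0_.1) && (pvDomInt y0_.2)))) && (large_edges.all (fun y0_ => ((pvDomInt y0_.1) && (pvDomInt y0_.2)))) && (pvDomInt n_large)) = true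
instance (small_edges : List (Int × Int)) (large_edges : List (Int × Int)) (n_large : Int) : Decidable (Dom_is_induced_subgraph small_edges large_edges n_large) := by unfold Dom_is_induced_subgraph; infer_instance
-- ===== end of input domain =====

-- B replaces A's brute-force scan over ALL k-permutations of range(n_large) by incremental
-- backtracking with per-vertex consistency pruning, returning the same lexicographically
-- first embedding (objective: alternative algorithm).

-- ===== PORT A =====

-- _sorted_edge(u, v)
def pvSedge (u v : Int) : Int × Int := if u ≤ v then (u, v) else (v, u)

-- A's inner double index loop with the `ok` flag and breaks (short-circuit .all = the flag+break loop)
def pvOkA (ses les : PySem.Set (Int × Int)) (sv : List Int) (mp : PySem.Dict Int Int) : Bool :=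
  (PySem.List.pyRange 0 sv.length 1).all fun i =>
    (PySem.List.pyRange (i + 1) sv.length 1).all fun j =>
      let us := PySem.List.pyGetD sv i 0
      let vs := PySem.List.pyGetD sv j 0
      let ul := PySem.Dict.getD mp us 0
      let vl := PySem.Dict.getD mp vs 0
      (PySem.Set.contains ses (pvSedge us vs)) == (PySem.Set.contains les (pvSedge ul vl))

-- A's 'for image in itertools.permutations(range(n_large), k)' loop with its early return
def pvLoopA (ses les : PySem.Set (Int × Int)) (sv : List Int) :
    List (List Int) → Bool × (Option (List (Int × Int)))
  | [] => (false, none)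
  | img :: rest =>
    let mp := PySem.Dict.ofList (sv.zip img)   -- mapping = dict(zip(small_vertices, image))
    if pvOkA ses les sv mp then (true, some mp.items) else pvLoopA ses les sv rest

def is_induced_subgraph (small_edges : List (Int × Int)) (large_edges : List (Int × Int)) (n_large : Int) : Bool × (Option (List (Int × Int))) :=
  let svs : PySem.Set Int :=
    small_edges.foldl (fun s e => PySem.Set.add (PySem.Set.add s e.1) e.2) PySem.Set.empty
  let sv := PySem.List.sorted svs (fun x => x) false
  let k := sv.length
  if (k : Int) > n_large then (false, none)
  else
    let les : PySem.Set (Int × Int) := PySem.Set.ofList (large_edges.map (fun e => pvSedge e.1 e.2))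
    let ses : PySem.Set (Int × Int) := PySem.Set.ofList (small_edges.map (fun e => pvSedge e.1 e.2))
    pvLoopA ses les sv (PySem.List.permutations (PySem.List.pyRange 0 n_large 1) k)

-- ===== PORT B =====

-- compatible(assigned, u, c)
def pvCompat (ses les : PySem.Set (Int × Int)) (assigned : List (Int × Int)) (u c : Int) : Bool :=
  assigned.all fun p =>
    (PySem.Set.contains ses (pvSedge p.1 u)) == (PySem.Set.contains les (pvSedge p.2 c))

mutual
-- search(assigned, rest): place rest[0], candidates tried in increasing order
def pvSearch (ses les : PySem.Set (Int × Int)) (n : Int) (assigned : List (Int × Int)) :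
    List Int → Option (List (Int × Int))
  | [] => some assigned          -- dict(assigned): keys are distinct, items = assigned
  | u :: rest => pvTry ses les n assigned u rest (PySem.List.pyRange 0 n 1)
  termination_by l => (l.length, 0)

-- the 'for c in range(n_large)' loop of search
def pvTry (ses les : PySem.Set (Int × Int)) (n : Int) (assigned : List (Int × Int))
    (u : Int) (rest : List Int) : List Int → Option (List (Int × Int))
  | [] => none
  | c :: cs =>
    if (assigned.map Prod.snd).contains c then pvTry ses les n assigned u rest cs
    else if pvCompat ses les assigned u c then
      match pvSearch ses les n (assigned ++ [(u, c)]) rest with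
      | some r => some r
      | none => pvTry ses les n assigned u rest cs
    else pvTry ses les n assigned u rest cs
  termination_by cands => (rest.length, cands.length + 1)
end

def is_induced_subgraph_alt (small_edges : List (Int × Int)) (large_edges : List (Int × Int)) (n_large : Int) : Bool × (Option (List (Int × Int))) :=
  let sv := PySem.List.sorted (PySem.Set.ofList (small_edges.flatMap (fun e => [e.1, e.2]))) (fun x => x) false
  let k := sv.length
  if (k : Int) > n_large then (false, none)
  else
    let ses : PySem.Set (Int × Int) := PySem.Set.ofList (small_edges.map (fun e => pvSedge e.1 e.2))
    let les : PySem.Set (Int × Int) := PySem.Set.ofList (large_edges.map (fun e => pvSedge e.1 e.2))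
    match pvSearch ses les n_large [] sv with
    | some m => (true, some m)
    | none => (false, none)

-- ===== PRECONDITION & SPEC =====
def Spec_is_induced_subgraph (small_edges : List (Int × Int)) (large_edges : List (Int × Int)) (n_large : Int) (out : Bool × (Option (List (Int × Int)))) : Prop := out = is_induced_subgraph_alt small_edges large_edges n_large
instance (small_edges : List (Int × Int)) (large_edges : List (Int × Int)) (n_large : Int) (out : Bool × (Option (List (Int × Int)))) : Decidable (Spec_is_induced_subgraph small_edges large_edges n_large out) := by unfold Spec_is_induced_subgraph; infer_instance

-- ===== CLAIM (what is proved, stated in full; the proofs are below) =====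
def Claim_equal_is_induced_subgraph : Prop := ∀ (small_edges : List (Int × Int)) (large_edges : List (Int × Int)) (n_large : Int), Dom_is_induced_subgraph small_edges large_edges n_large → Spec_is_induced_subgraph small_edges large_edges n_large (is_induced_subgraph small_edges large_edges n_large)

-- ===== LEMMAS AND PROOFS =====

-- the per-pair agreement check, on already-paired vertices
def pvOkP (ses les : PySem.Set (Int × Int)) (p q : Int × Int) : Bool :=
  (PySem.Set.contains ses (pvSedge p.1 q.1)) == (PySem.Set.contains les (pvSedge p.2 q.2))

-- structural "all ordered pairs agree" check
def pvPairsOk (ses les : PySem.Set (Int × Int)) : List (Int × Int) → Bool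
  | [] => true
  | p :: l => l.all (pvOkP ses les p) && pvPairsOk ses les l

-- A-side reference search: first extension of `chosen` by a permutation of `pool` passing the full pairwise check
def pvSearchA (ses les : PySem.Set (Int × Int)) (chosen : List (Int × Int)) (rest : List Int)
    (pool : List Int) : Option (List (Int × Int)) :=
  (PySem.List.permutations pool rest.length).findSome? fun img =>
    if pvPairsOk ses les (chosen ++ rest.zip img) then some (chosen ++ rest.zip img) else none

theorem pvPairsOk_iff_pairwise (ses les : PySem.Set (Int × Int)) (l : List (Int × Int)) :
    pvPairsOk ses les l = true ↔ l.Pairwise (fun p q => pvOkP ses les p q = true) := by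
  induction l with
  | nil => simp [pvPairsOk]
  | cons p l ih => simp [pvPairsOk, List.pairwise_cons, List.all_eq_true, ih]

theorem pvPairsOk_append (ses les : PySem.Set (Int × Int)) (l m : List (Int × Int)) :
    pvPairsOk ses les (l ++ m) =
      (pvPairsOk ses les l && l.all (fun p => m.all (fun q => pvOkP ses les p q)) && pvPairsOk ses les m) := by
  apply Bool.coe_iff_coe.mp
  simp only [Bool.and_eq_true, pvPairsOk_iff_pairwise, List.pairwise_append, List.all_eq_true]
  tauto

theorem pvFindSome?_congr {α β : Type} (l : List α) (f g : α → Option β)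
    (h : ∀ x ∈ l, f x = g x) : l.findSome? f = l.findSome? g := by
  induction l with
  | nil => rfl
  | cons x xs ih =>
    simp only [List.findSome?_cons, h x (by simp)]
    cases g x with
    | some b => rfl
    | none => exact ih (fun y hy => h y (by simp [hy]))

theorem pvFindSome?_flatMap {α β γ : Type} (l : List α) (g : α → List β) (f : β → Option γ) :
    (l.flatMap g).findSome? f = l.findSome? (fun x => (g x).findSome? f) := by
  induction l with
  | nil => rfl
  | cons x xs ih =>
    simp only [List.flatMap_cons, List.findSome?_append, ih, List.findSome?_cons]
    cases (g x).findSome? f <;> simp [Option.or]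

theorem pvFindSome?_range {α β : Type} (l : List α) (F : Nat → Option β) (G : α → Option β)
    (h : ∀ i (hi : i < l.length), F i = G l[i]) :
    (List.range l.length).findSome? F = l.findSome? G := by
  induction l generalizing F with
  | nil => rfl
  | cons x xs ih =>
    have h0 : F 0 = G x := by simpa using h 0 (by simp)
    rw [List.length_cons, List.range_succ_eq_map, List.findSome?_cons, List.findSome?_map,
        List.findSome?_cons, h0]
    cases hg : G x with
    | some b => rfl
    | none =>
      have := ih (fun i => F (i+1)) (fun i hi => by simpa using h (i+1) (by simp; omega))
      simpa [Function.comp, Nat.succ_eq_add_one] using this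

theorem pvPerm_unfold {α : Type} (xs : List α) (r : Nat) :
    PySem.List.permutations xs (r + 1) =
      (List.range xs.length).flatMap fun i =>
        match xs[i]? with
        | none => []
        | some x => (PySem.List.permutations (xs.eraseIdx i) r).map (fun p => x :: p) := by
  rw [PySem.List.permutations]
  rfl

-- unfolding of A's reference search one level
theorem pvSearchA_cons (ses les : PySem.Set (Int × Int)) (chosen : List (Int × Int))
    (u : Int) (rest : List Int) (pool : List Int) (hnd : pool.Nodup) :
    pvSearchA ses les chosen (u :: rest) pool =
      pool.findSome? (fun x =>
        (PySem.List.permutations (pool.erase x) rest.length).findSome? fun img =>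
          if pvPairsOk ses les (chosen ++ (u, x) :: rest.zip img)
          then some (chosen ++ (u, x) :: rest.zip img) else none) := by
  unfold pvSearchA
  rw [List.length_cons, pvPerm_unfold, pvFindSome?_flatMap]
  apply pvFindSome?_range
  intro i hi
  rw [List.getElem?_eq_getElem hi, ← List.Nodup.erase_getElem hnd i hi, List.findSome?_map]
  apply pvFindSome?_congr
  intro img _
  simp [Function.comp]

-- B's candidate loop = findSome? over the unused candidates
theorem pvTry_eq_filter (ses les : PySem.Set (Int × Int)) (n : Int) (assigned : List (Int × Int))
    (u : Int) (rest : List Int) (cands : List Int) :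
    pvTry ses les n assigned u rest cands =
      (cands.filter (fun c => !((assigned.map Prod.snd).contains c))).findSome?
        (fun c => if pvCompat ses les assigned u c
                  then pvSearch ses les n (assigned ++ [(u, c)]) rest else none) := by
  induction cands with
  | nil => rw [pvTry]; rfl
  | cons c cs ih =>
    rw [pvTry]
    by_cases h1 : (assigned.map Prod.snd).contains c = true
    · rw [if_pos h1, ih]
      congr 1
      rw [List.filter_cons, show (!(assigned.map Prod.snd).contains c) = false by
        rw [h1]; rfl]
      rfl
    · have h1' : (assigned.map Prod.snd).contains c = false := by simpa using h1
      rw [if_neg h1]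
      rw [show (c :: cs).filter (fun c => !(assigned.map Prod.snd).contains c)
          = c :: cs.filter (fun c => !(assigned.map Prod.snd).contains c) by
        rw [List.filter_cons, h1']; rfl]
      rw [List.findSome?_cons]
      by_cases h2 : pvCompat ses les assigned u c = true
      · simp only [h2, if_true]
        cases hs : pvSearch ses les n (assigned ++ [(u, c)]) rest with
        | some r => simp
        | none => simp [ih]
      · simp [h2, ih]

-- main correspondence: pruned backtracking = first-passing permutation
theorem pvMain (ses les : PySem.Set (Int × Int)) (n : Int) (rest : List Int) :
    ∀ (chosen : List (Int × Int)) (pool : List Int),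
      pvPairsOk ses les chosen = true →
      pool.Nodup →
      pool = (PySem.List.pyRange 0 n 1).filter (fun c => !((chosen.map Prod.snd).contains c)) →
      pvSearchA ses les chosen rest pool = pvSearch ses les n chosen rest := by
  induction rest with
  | nil =>
    intro chosen pool hch hnd hpool
    rw [pvSearch]
    unfold pvSearchA
    have h0 : PySem.List.permutations pool ([] : List Int).length = [[]] := by
      rw [PySem.List.permutations.eq_def]
      rfl
    rw [h0, List.findSome?_cons]
    simp [hch]
  | cons u rs ih =>
    intro chosen pool hch hnd hpool
    rw [pvSearch, pvTry_eq_filter, ← hpool, pvSearchA_cons ses les chosen u rs pool hnd]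
    apply pvFindSome?_congr
    intro x hx
    by_cases hc : pvCompat ses les chosen u x = true
    · rw [if_pos hc]
      have hch' : pvPairsOk ses les (chosen ++ [(u, x)]) = true := by
        rw [pvPairsOk_append]
        simp only [Bool.and_eq_true, List.all_eq_true]
        refine ⟨⟨hch, ?_⟩, by rfl⟩
        intro p hp q hq
        simp only [List.mem_singleton] at hq
        subst hq
        simp only [pvCompat, List.all_eq_true] at hc
        simpa [pvOkP] using hc p hp
      have hpool' : pool.erase x = (PySem.List.pyRange 0 n 1).filter
          (fun c => !(((chosen ++ [(u, x)]).map Prod.snd).contains c)) := by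
        rw [List.Nodup.erase_eq_filter hnd x, hpool, List.filter_filter]
        apply List.filter_congr
        intro c _
        simp only [List.map_append, List.map_cons, List.map_nil, List.contains_append]
        cases hcx : c == x <;>
          simp_all [bne, List.contains_eq_mem]
      rw [← ih (chosen ++ [(u, x)]) (pool.erase x) hch' (hnd.erase x) hpool']
      unfold pvSearchA
      apply pvFindSome?_congr
      intro img _
      have he : (chosen ++ [(u, x)]) ++ rs.zip img = chosen ++ (u, x) :: rs.zip img := by simp
      rw [he]
    · rw [if_neg hc]
      rw [List.findSome?_eq_none_iff]
      intro img _
      rw [if_neg]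
      intro hpk
      have hpk' : pvPairsOk ses les ((chosen ++ [(u, x)]) ++ rs.zip img) = true := by
        rw [List.append_assoc]; simpa using hpk
      rw [pvPairsOk_append] at hpk'
      simp only [Bool.and_eq_true, List.all_eq_true] at hpk'
      have h3 := hpk'.1.1
      rw [pvPairsOk_append] at h3
      simp only [Bool.and_eq_true, List.all_eq_true] at h3
      apply hc
      rw [pvCompat, List.all_eq_true]
      intro p hp
      have h4 := h3.1.2 p hp
      simpa [pvOkP] using h4

-- dict(zip(sv, img)) has items sv.zip img when sv is duplicate-free
theorem pvDict_items (sv img : List Int) (hnd : sv.Nodup) (hlen : img.length = sv.length) :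
    (PySem.Dict.ofList (sv.zip img)).items = sv.zip img := by
  have h := PySem.Dict.items_foldl_insert_fresh (sv.zip img) Prod.fst Prod.snd PySem.Dict.empty
    (fun a _ => by simp [PySem.Dict.contains_empty]) (by rw [List.map_fst_zip (by omega)]; exact hnd)
  simpa [PySem.Dict.ofList, PySem.Dict.update] using h

theorem pvDict_getD (sv img : List Int) (hnd : sv.Nodup) (hlen : img.length = sv.length)
    (t : Nat) (ht : t < sv.length) :
    PySem.Dict.getD (PySem.Dict.ofList (sv.zip img)) sv[t] 0 = img[t]'(by omega) := by
  apply PySem.Dict.getD_of_mem_items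
  · rw [pvDict_items sv img hnd hlen]
    have hz : t < (sv.zip img).length := by simp [List.length_zip]; omega
    have := List.getElem_mem hz
    rwa [List.getElem_zip] at this
  · have : (PySem.Dict.ofList (sv.zip img)).keys = sv := by
      simp only [PySem.Dict.keys, pvDict_items sv img hnd hlen]
      exact List.map_fst_zip (by omega)
    rw [this]; exact hnd

-- A's index-based double loop equals the structural pairwise check on the zipped assignment
theorem pvOkA_eq_pairsOk (ses les : PySem.Set (Int × Int)) (sv img : List Int)
    (hnd : sv.Nodup) (hlen : img.length = sv.length) :
    pvOkA ses les sv (PySem.Dict.ofList (sv.zip img)) = pvPairsOk ses les (sv.zip img) := by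
  have hzlen : (sv.zip img).length = sv.length := by simp [List.length_zip]; omega
  apply Bool.coe_iff_coe.mp
  rw [pvPairsOk_iff_pairwise, List.pairwise_iff_getElem]
  unfold pvOkA
  simp only [List.all_eq_true, PySem.List.mem_pyRange_one]
  have key : ∀ (i j : Nat) (hi : i < sv.length) (hj : j < sv.length),
      (ses.contains (pvSedge (PySem.List.pyGetD sv (i : Int) 0) (PySem.List.pyGetD sv (j : Int) 0)) ==
        les.contains
          (pvSedge ((PySem.Dict.ofList (sv.zip img)).getD (PySem.List.pyGetD sv (i : Int) 0) 0)
            ((PySem.Dict.ofList (sv.zip img)).getD (PySem.List.pyGetD sv (j : Int) 0) 0)))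
      = pvOkP ses les ((sv.zip img)[i]'(by omega)) ((sv.zip img)[j]'(by omega)) := by
    intro i j hi hj
    rw [PySem.List.pyGetD_eq_getElem sv 0 (by omega) (by exact_mod_cast hi),
        PySem.List.pyGetD_eq_getElem sv 0 (by omega) (by exact_mod_cast hj)]
    simp only [Int.toNat_natCast]
    rw [pvDict_getD sv img hnd hlen i hi, pvDict_getD sv img hnd hlen j hj]
    simp [pvOkP, List.getElem_zip]
  constructor
  · intro h i j hi hj hij
    have hi' : i < sv.length := by omega
    have hj' : j < sv.length := by omega
    have := h (i : Int) ⟨by omega, by exact_mod_cast hi'⟩ (j : Int)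
      ⟨by exact_mod_cast hij, by exact_mod_cast hj'⟩
    rwa [key i j hi' hj'] at this
  · intro h x hx y hy
    have hx0 : (x.toNat : Int) = x := Int.toNat_of_nonneg hx.1
    have hy0 : (y.toNat : Int) = y := Int.toNat_of_nonneg (by omega)
    rw [← hx0, ← hy0, key x.toNat y.toNat (by omega) (by omega)]
    exact h x.toNat y.toNat (by omega) (by omega) (by omega)

theorem pvLoopA_eq (ses les : PySem.Set (Int × Int)) (sv : List Int) (perms : List (List Int)) :
    pvLoopA ses les sv perms =
      match perms.findSome? (fun img =>
        if pvOkA ses les sv (PySem.Dict.ofList (sv.zip img))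
        then some (PySem.Dict.ofList (sv.zip img)).items else none) with
      | some m => (true, some m)
      | none => (false, none) := by
  induction perms with
  | nil => rfl
  | cons img rest ih =>
    rw [pvLoopA, List.findSome?_cons]
    by_cases h : pvOkA ses les sv (PySem.Dict.ofList (sv.zip img)) = true
    · simp only [h, if_true]
    · simp only [h, if_false, Bool.false_eq_true, ih]

theorem pvSvs_eq (small_edges : List (Int × Int)) :
    small_edges.foldl (fun s e => PySem.Set.add (PySem.Set.add s e.1) e.2) PySem.Set.empty
      = PySem.Set.ofList (small_edges.flatMap (fun e => [e.1, e.2])) := by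
  rw [PySem.Set.ofList_eq_foldl]
  suffices h : ∀ (s : PySem.Set Int),
      small_edges.foldl (fun s e => PySem.Set.add (PySem.Set.add s e.1) e.2) s
        = (small_edges.flatMap (fun e => [e.1, e.2])).foldl PySem.Set.add s from h _
  induction small_edges with
  | nil => intro s; rfl
  | cons e l ih => intro s; simp only [List.foldl_cons, List.flatMap_cons, List.foldl_append, ih]; rfl

-- ===== VERDICT (by name: the statement is the Claim_ definition above) =====
theorem is_induced_subgraph_spec : Claim_equal_is_induced_subgraph := by
  intro small_edges large_edges n_large _
  unfold Spec_is_induced_subgraph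
  unfold is_induced_subgraph is_induced_subgraph_alt
  rw [pvSvs_eq]
  dsimp only
  set sv := PySem.List.sorted (PySem.Set.ofList (small_edges.flatMap (fun e => [e.1, e.2])))
    (fun x => x) false with hsv
  set ses : PySem.Set (Int × Int) :=
    PySem.Set.ofList (small_edges.map (fun e => pvSedge e.1 e.2)) with hses
  set les : PySem.Set (Int × Int) :=
    PySem.Set.ofList (large_edges.map (fun e => pvSedge e.1 e.2)) with hles
  by_cases hk : (sv.length : Int) > n_large
  · rw [if_pos hk, if_pos hk]
  · rw [if_neg hk, if_neg hk, pvLoopA_eq]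
    have hnd : sv.Nodup :=
      (PySem.List.sorted_perm _ _ _).symm.nodup (PySem.Set.nodup_ofList _)
    have hcong :
        (PySem.List.permutations (PySem.List.pyRange 0 n_large 1) sv.length).findSome?
          (fun img => if pvOkA ses les sv (PySem.Dict.ofList (sv.zip img)) = true
            then some (PySem.Dict.ofList (sv.zip img)).items else none)
        = pvSearchA ses les [] sv (PySem.List.pyRange 0 n_large 1) := by
      unfold pvSearchA
      apply pvFindSome?_congr
      intro img hmem
      have hl : img.length = sv.length := PySem.List.length_of_mem_permutations hmem
      rw [pvOkA_eq_pairsOk ses les sv img hnd hl, pvDict_items sv img hnd hl]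
      simp
    rw [hcong, pvMain ses les n_large sv [] (PySem.List.pyRange 0 n_large 1) rfl
      (PySem.List.nodup_pyRange_one 0 n_large) (by simp)]
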